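-- pv_equiv track=rewrite | github.com/predandrada/epsm-lane-optimization | src/boundary_detection.py | get_idx_three_params
-- ===== SOURCE A (Python) =====
-- def get_idx_three_params(i, j, k, n):
--     if j > i:
--         aux = i
--         i = j
--         j = aux
--
--     if j == i:
--         return None
--
--     column_offset = 0
--     for temp in range(1, j + 1):
--         column_offset += (n - temp) * (n - 2)
--
--     if column_offset >= 0.5 * (n - 2) * (n - 1) * n:
--         return None
--
--     if not (j + 1 <= i <= n - 1):
--         return None
--
--     row_offset = (i - (j + 1)) * (n - 2)
--
--     k_offset = k
--     if k > i:
--         k_offset -= 1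
--
--     if k > j:
--         k_offset -= 1
--
--     return column_offset + row_offset + k_offset
-- ===== SOURCE B (Python) =====
-- def get_idx_three_params(i, j, k, n):
--     lo, hi = min(i, j), max(i, j)
--     if lo == hi or not (lo + 1 <= hi <= n - 1):
--         return None
--     m = max(lo, 0)
--     column = (n - 2) * m * (2 * n - m - 1) // 2
--     if column >= 0.5 * (n - 2) * (n - 1) * n:
--         return None
--     return column + (hi - lo - 1) * (n - 2) + k - (k > hi) - (k > lo)
-- ===== Notes on version B (the rewrite author's own statement) =====
-- stated objective: faster
-- what changed: Replaced the O(j) column_offset summation loop with a closed-form arithmetic-series formula (and min/max instead of the swap), keeping the same overflow guard, so the index is computed in O(1).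
import Mathlib
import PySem

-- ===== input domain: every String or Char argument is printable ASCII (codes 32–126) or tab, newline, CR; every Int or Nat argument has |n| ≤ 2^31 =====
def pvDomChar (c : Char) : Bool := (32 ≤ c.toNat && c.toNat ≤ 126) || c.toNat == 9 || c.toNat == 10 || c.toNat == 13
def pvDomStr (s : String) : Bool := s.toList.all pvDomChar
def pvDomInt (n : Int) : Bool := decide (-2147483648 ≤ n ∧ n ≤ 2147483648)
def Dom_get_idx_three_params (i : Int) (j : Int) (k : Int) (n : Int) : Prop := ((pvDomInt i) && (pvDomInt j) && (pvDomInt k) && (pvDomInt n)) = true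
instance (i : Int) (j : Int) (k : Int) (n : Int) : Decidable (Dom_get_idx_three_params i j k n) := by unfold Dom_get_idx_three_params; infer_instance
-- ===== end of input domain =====

-- B replaces A's O(j) column_offset summation loop by a closed-form arithmetic-series formula
-- (and min/max instead of the swap), keeping the same overflow guard: O(1) instead of O(j).

-- ===== PORT A =====
-- Round-to-nearest-even of an integer to 53 significant bits: the exact value of the IEEE-754
-- double nearest to the integer m.  Used by BOTH ports to model the Python float threshold
-- 0.5*(n-2)*(n-1)*n exactly on the stated domain |n| ≤ 2^31: there 0.5*(n-2) and the int→float
-- conversions are exact, and multiplying by the exact power of two 0.5 only shifts the exponent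
-- (no overflow or subnormals arise for these magnitudes), so the Python float equals
-- pvFl53 (pvFl53 ((n-2)*(n-1)) * n) / 2 and the exact int-vs-float comparison
-- 'column_offset >= 0.5*(n-2)*(n-1)*n' is exactly 'pvFl53 (pvFl53 ((n-2)*(n-1)) * n) ≤ 2*column_offset'.
def pvFl53 (m : Int) : Int :=
  let a := m.natAbs
  if a ≤ 2 ^ 53 then m
  else
    let e := Nat.log2 a - 52
    let q := a / 2 ^ e
    let r := a % 2 ^ e
    let h := 2 ^ (e - 1)
    let q' := if h < r ∨ (r = h ∧ q % 2 = 1) then q + 1 else q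
    (if m < 0 then -1 else 1) * ((q' * 2 ^ e : Nat) : Int)

-- A's body after the initial swap (i is the larger, j the smaller argument).
def pvABody (i : Int) (j : Int) (k : Int) (n : Int) : Option Int :=
  if j = i then none
  else
    let column_offset :=
      (PySem.List.pyRange 1 (j + 1) 1).foldl (fun acc temp => acc + (n - temp) * (n - 2)) 0
    -- 'column_offset >= 0.5 * (n - 2) * (n - 1) * n', modeled exactly (see pvFl53 above)
    if pvFl53 (pvFl53 ((n - 2) * (n - 1)) * n) ≤ 2 * column_offset then none
    else if ¬ (j + 1 ≤ i ∧ i ≤ n - 1) then none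
    else
      let row_offset := (i - (j + 1)) * (n - 2)
      let k_offset := if k > i then k - 1 else k
      let k_offset := if k > j then k_offset - 1 else k_offset
      some (column_offset + row_offset + k_offset)

def get_idx_three_params (i : Int) (j : Int) (k : Int) (n : Int) : Option Int :=
  if j > i then pvABody j i k n else pvABody i j k n

-- ===== PORT B =====
def get_idx_three_params_alt (i : Int) (j : Int) (k : Int) (n : Int) : Option Int :=
  let lo := min i j
  let hi := max i j
  if lo = hi ∨ ¬ (lo + 1 ≤ hi ∧ hi ≤ n - 1) then none
  else
    let m := max lo 0
    let column := PySem.Int.floordiv ((n - 2) * m * (2 * n - m - 1)) 2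
    -- 'column >= 0.5 * (n - 2) * (n - 1) * n', the same float guard, modeled exactly as in port A
    if pvFl53 (pvFl53 ((n - 2) * (n - 1)) * n) ≤ 2 * column then none
    else some (column + (hi - lo - 1) * (n - 2) + k - (if k > hi then 1 else 0) - (if k > lo then 1 else 0))

-- ===== PRECONDITION & SPEC =====
def Spec_get_idx_three_params (i : Int) (j : Int) (k : Int) (n : Int) (out : Option Int) : Prop := out = get_idx_three_params_alt i j k n
instance (i : Int) (j : Int) (k : Int) (n : Int) (out : Option Int) : Decidable (Spec_get_idx_three_params i j k n out) := by unfold Spec_get_idx_three_params; infer_instance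

-- ===== CLAIM (what is proved, stated in full; the proofs are below) =====
def Claim_equal_get_idx_three_params : Prop := ∀ (i : Int) (j : Int) (k : Int) (n : Int), Dom_get_idx_three_params i j k n → Spec_get_idx_three_params i j k n (get_idx_three_params i j k n)

-- ===== LEMMAS AND PROOFS =====

lemma pv_two_mul_colAux (n : Int) (m : Nat) :
    2 * ((PySem.List.pyRange 1 ((m : Int) + 1) 1).foldl
          (fun acc temp => acc + (n - temp) * (n - 2)) 0)
      = (n - 2) * ((m : Int) * (2 * n - (m : Int) - 1)) := by
  induction m with
  | zero => simp [PySem.List.pyRange_one_eq_nil]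
  | succ p ih =>
      have hcast : ((p + 1 : Nat) : Int) + 1 = ((p : Int) + 1) + 1 := by push_cast; ring
      rw [hcast, PySem.List.pyRange_one_succ_right (by omega), List.foldl_append]
      simp only [List.foldl_cons, List.foldl_nil]
      push_cast
      push_cast at ih
      ring_nf
      ring_nf at ih
      linarith [ih]

lemma pv_two_mul_col (n j : Int) :
    2 * ((PySem.List.pyRange 1 (j + 1) 1).foldl
          (fun acc temp => acc + (n - temp) * (n - 2)) 0)
      = (n - 2) * (max j 0 * (2 * n - max j 0 - 1)) := by
  by_cases h : j ≤ 0
  · rw [PySem.List.pyRange_one_eq_nil (by omega)]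
    simp [max_eq_right h]
  · have h' : 0 ≤ j := by omega
    have hj : ((j.toNat : Int)) = j := Int.toNat_of_nonneg h'
    have := pv_two_mul_colAux n j.toNat
    rw [hj] at this
    rw [this, max_eq_left h']

-- the heart of the equivalence: A's swapped body versus B, for lo ≤ hi
lemma pv_body_eq (lo hi k n : Int) (hle : lo ≤ hi) :
    pvABody hi lo k n = get_idx_three_params_alt lo hi k n := by
  by_cases heq : lo = hi
  · simp [pvABody, get_idx_three_params_alt, heq]
  · have hlt : lo < hi := lt_of_le_of_ne hle heq
    have h2C := pv_two_mul_col n lo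
    simp only [pvABody, get_idx_three_params_alt, min_eq_left hle, max_eq_right hle, if_neg heq]
    have hfd : PySem.Int.floordiv ((n - 2) * max lo 0 * (2 * n - max lo 0 - 1)) 2
        = (PySem.List.pyRange 1 (lo + 1) 1).foldl (fun acc temp => acc + (n - temp) * (n - 2)) 0 := by
      rw [PySem.Int.floordiv_eq_ediv_of_pos (by norm_num), mul_assoc, ← h2C,
          Int.mul_ediv_cancel_left _ (by norm_num)]
    by_cases hrange : lo + 1 ≤ hi ∧ hi ≤ n - 1
    · rw [if_neg (show ¬ (lo = hi ∨ ¬ (lo + 1 ≤ hi ∧ hi ≤ n - 1)) from by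
        push_neg; exact ⟨heq, hrange⟩)]
      rw [hfd]
      by_cases hf : pvFl53 (pvFl53 ((n - 2) * (n - 1)) * n) ≤
          2 * ((PySem.List.pyRange 1 (lo + 1) 1).foldl
                (fun acc temp => acc + (n - temp) * (n - 2)) 0)
      · rw [if_pos hf, if_pos hf]
      · rw [if_neg hf, if_neg hf, if_neg (not_not_intro hrange)]
        simp only [gt_iff_lt]
        split_ifs <;> (congr 1; ring)
    · rw [if_pos (Or.inr hrange)]
      by_cases hf : pvFl53 (pvFl53 ((n - 2) * (n - 1)) * n) ≤
          2 * ((PySem.List.pyRange 1 (lo + 1) 1).foldl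
                (fun acc temp => acc + (n - temp) * (n - 2)) 0)
      · rw [if_pos hf]
      · rw [if_neg hf, if_pos hrange]

lemma pv_alt_comm (i j k n : Int) :
    get_idx_three_params_alt i j k n = get_idx_three_params_alt j i k n := by
  simp only [get_idx_three_params_alt, min_comm, max_comm]

-- ===== VERDICT (by name: the statement is the Claim_ definition above) =====
theorem get_idx_three_params_spec : Claim_equal_get_idx_three_params := by
  unfold Claim_equal_get_idx_three_params
  intro i j k n _
  show get_idx_three_params i j k n = get_idx_three_params_alt i j k n
  by_cases h : j > i
  · rw [show get_idx_three_params i j k n = pvABody j i k n from by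
      simp [get_idx_three_params, h]]
    exact pv_body_eq i j k n h.le
  · have h' : j ≤ i := by omega
    rw [show get_idx_three_params i j k n = pvABody i j k n from by
      simp [get_idx_three_params, h]]
    rw [pv_body_eq j i k n h']
    exact pv_alt_comm j i k n
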